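-- pv_equiv track=rewrite | github.com/AlphaBravoJuliet/Le-Fracteur | projet/tempCodeRunnerFile.py | encrypter_pour_IBAN
-- ===== SOURCE A (Python) =====
-- def fraction(liste):
--     n, d, num, den = 0, 1, 1, 0
--     for u in liste:
--         n, d, num, den = num, den, num * u + n, den * u + d
--     return str(num) + "/" + str(den)
--
-- def encrypter_pour_IBAN(message):
--     L = []
--     # Conversion des caractères en valeurs numériques selon le standard IBAN
--     for lettre in message:
--         if 48 <= ord(lettre) <= 57:
--             L.append(ord(lettre) - ord("0") + 1)
--         elif 65 <= ord(lettre) <= 90: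
--             L.append(ord(lettre) - ord("A") + 11)
--     return fraction(L)
-- ===== SOURCE B (Python) =====
-- def encrypter_pour_IBAN(message):
--     def val(c):
--         o = ord(c)
--         if 48 <= o <= 57:
--             return o - 47
--         if 65 <= o <= 90:
--             return o - 54
--         return None
--     L = [v for v in map(val, message) if v is not None]
--     p, q = 1, 0
--     for u in reversed(L):
--         p, q = u * p + q, p
--     return str(p) + "/" + str(q)
-- ===== Notes on version B (the rewrite author's own statement) =====
-- stated objective: alternative
-- what changed: Replaces the four-variable forward convergent recurrence with a two-scalar back-substitution over the reversed value list (continuant palindromy), and builds the value list by a filtering comprehension instead of conditional appends.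
import Mathlib
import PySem

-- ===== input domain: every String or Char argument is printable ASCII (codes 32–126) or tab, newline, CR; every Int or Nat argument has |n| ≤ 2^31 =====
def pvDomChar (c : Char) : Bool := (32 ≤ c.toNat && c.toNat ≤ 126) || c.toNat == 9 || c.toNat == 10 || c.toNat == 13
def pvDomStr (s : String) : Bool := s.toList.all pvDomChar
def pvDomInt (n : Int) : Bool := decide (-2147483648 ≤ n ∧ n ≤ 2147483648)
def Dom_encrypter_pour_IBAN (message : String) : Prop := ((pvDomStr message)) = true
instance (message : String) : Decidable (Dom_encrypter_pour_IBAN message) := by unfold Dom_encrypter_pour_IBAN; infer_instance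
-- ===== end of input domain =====

-- B replaces A's four-variable forward convergent recurrence by a two-scalar
-- back-substitution over the reversed list (alternative decomposition, same cost).

-- ===== PORT A =====
-- 'fraction': forward recurrence over four scalars, then "num/den".
def fractionA (liste : List Int) : String :=
  PySem.Int.toStr
      ((liste.foldl
        (fun (st : Int × Int × Int × Int) u =>
          let (n, d, num, den) := st
          (num, den, num * u + n, den * u + d))
        (0, 1, 1, 0)).2.2.1)
    ++ "/" ++
  PySem.Int.toStr
      ((liste.foldl
        (fun (st : Int × Int × Int × Int) u =>
          let (n, d, num, den) := st
          (num, den, num * u + n, den * u + d))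
        (0, 1, 1, 0)).2.2.2)

def encrypter_pour_IBAN (message : String) : String :=
  fractionA
    (message.toList.foldl
      (fun (L : List Int) lettre =>
        if 48 ≤ lettre.toNat ∧ lettre.toNat ≤ 57 then
          L ++ [(lettre.toNat : Int) - 48 + 1]
        else if 65 ≤ lettre.toNat ∧ lettre.toNat ≤ 90 then
          L ++ [(lettre.toNat : Int) - 65 + 11]
        else L)
      [])

-- ===== PORT B =====
-- helper 'val': the character's IBAN value, or none.
def valB (c : Char) : Option Int :=
  if 48 ≤ c.toNat ∧ c.toNat ≤ 57 then some ((c.toNat : Int) - 47)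
  else if 65 ≤ c.toNat ∧ c.toNat ≤ 90 then some ((c.toNat : Int) - 54)
  else none

def encrypter_pour_IBAN_alt (message : String) : String :=
  PySem.Int.toStr
      (((message.toList.filterMap valB).reverse.foldl
        (fun (pq : Int × Int) u => (u * pq.1 + pq.2, pq.1)) (1, 0)).1)
    ++ "/" ++
  PySem.Int.toStr
      (((message.toList.filterMap valB).reverse.foldl
        (fun (pq : Int × Int) u => (u * pq.1 + pq.2, pq.1)) (1, 0)).2)

-- ===== PRECONDITION & SPEC =====
def Spec_encrypter_pour_IBAN (message : String) (out : String) : Prop := out = encrypter_pour_IBAN_alt message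
instance (message : String) (out : String) : Decidable (Spec_encrypter_pour_IBAN message out) := by unfold Spec_encrypter_pour_IBAN; infer_instance

-- ===== CLAIM (what is proved, stated in full; the proofs are below) =====
def Claim_equal_encrypter_pour_IBAN : Prop := ∀ (message : String), Dom_encrypter_pour_IBAN message → Spec_encrypter_pour_IBAN message (encrypter_pour_IBAN message)

-- ===== LEMMAS AND PROOFS =====

-- The two conversions build the same list of values.
theorem conv_eq (cs : List Char) (acc : List Int) :
    cs.foldl
      (fun (L : List Int) lettre =>
        if 48 ≤ lettre.toNat ∧ lettre.toNat ≤ 57 then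
          L ++ [(lettre.toNat : Int) - 48 + 1]
        else if 65 ≤ lettre.toNat ∧ lettre.toNat ≤ 90 then
          L ++ [(lettre.toNat : Int) - 65 + 11]
        else L)
      acc = acc ++ cs.filterMap valB := by
  induction cs generalizing acc with
  | nil => simp
  | cons c t ih =>
    simp only [List.foldl_cons, List.filterMap_cons]
    split_ifs with h1 h2
    · have hv : valB c = some ((c.toNat : Int) - 48 + 1) := by
        simp only [valB, if_pos h1]; congr 1; ring
      rw [hv, ih]; simp
    · have hv : valB c = some ((c.toNat : Int) - 65 + 11) := by
        simp only [valB, if_neg h1, if_pos h2]; congr 1; ring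
      rw [hv, ih]; simp
    · have hv : valB c = none := by simp only [valB, if_neg h1, if_neg h2]
      rw [hv, ih]

-- Key invariant: the (num, den) pair of A's forward recurrence from an arbitrary
-- state is a linear combination of B's back-substitution pair over the same list.
theorem fold_lin (t : List Int) (n d num den : Int) :
    (t.foldl
      (fun (st : Int × Int × Int × Int) u =>
        let (n, d, num, den) := st
        (num, den, num * u + n, den * u + d))
      (n, d, num, den)).2.2
    = (num * (t.reverse.foldl (fun (pq : Int × Int) u => (u * pq.1 + pq.2, pq.1)) (1, 0)).1
        + n * (t.reverse.foldl (fun (pq : Int × Int) u => (u * pq.1 + pq.2, pq.1)) (1, 0)).2,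
       den * (t.reverse.foldl (fun (pq : Int × Int) u => (u * pq.1 + pq.2, pq.1)) (1, 0)).1
        + d * (t.reverse.foldl (fun (pq : Int × Int) u => (u * pq.1 + pq.2, pq.1)) (1, 0)).2) := by
  induction t generalizing n d num den with
  | nil => simp
  | cons u s ih =>
    simp only [List.foldl_cons, List.reverse_cons, List.foldl_append, List.foldl_cons,
      List.foldl_nil]
    rw [ih]
    rw [Prod.mk.injEq]
    constructor <;> ring

-- ===== VERDICT (by name: the statement is the Claim_ definition above) =====
theorem encrypter_pour_IBAN_spec : Claim_equal_encrypter_pour_IBAN := by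
  intro message _
  unfold Spec_encrypter_pour_IBAN encrypter_pour_IBAN encrypter_pour_IBAN_alt fractionA
  rw [conv_eq, List.nil_append, fold_lin]
  norm_num
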